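-- pv_equiv track=rewrite | github.com/aodelta/python_utility | math/arithmetique/facteurs_premiers.py | reduire_en_puissance
-- ===== SOURCE A (Python) =====
-- def reduire_en_puissance(diviseurs):
--     diviseurs.sort()
--     diviseurs_dictionnary_powers = {}
--     for diviseur in diviseurs:
--         if diviseur in diviseurs_dictionnary_powers:
--             diviseurs_dictionnary_powers[diviseur] += 1
--         else:
--             diviseurs_dictionnary_powers[diviseur] = 1
--
--     return diviseurs_dictionnary_powers
-- ===== SOURCE B (Python) =====
-- def reduire_en_puissance(diviseurs):
--     # Sort in place (same observable mutation as A), then run-length encode: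
--     # count each run of equal consecutive elements once instead of a dict
--     # membership test / update per element.
--     diviseurs.sort()
--     powers = {}
--     n = len(diviseurs)
--     i = 0
--     while i < n:
--         j = i + 1
--         while j < n and diviseurs[j] == diviseurs[i]:
--             j += 1
--         powers[diviseurs[i]] = j - i
--         i = j
--     return powers
-- ===== Notes on version B (the rewrite author's own statement) =====
-- stated objective: alternative
-- what changed: B replaces the per-element dict membership/update loop by a run-length encoding of the sorted list (count each run of equal consecutive elements once), keeping the in-place sort.
import Mathlib
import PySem

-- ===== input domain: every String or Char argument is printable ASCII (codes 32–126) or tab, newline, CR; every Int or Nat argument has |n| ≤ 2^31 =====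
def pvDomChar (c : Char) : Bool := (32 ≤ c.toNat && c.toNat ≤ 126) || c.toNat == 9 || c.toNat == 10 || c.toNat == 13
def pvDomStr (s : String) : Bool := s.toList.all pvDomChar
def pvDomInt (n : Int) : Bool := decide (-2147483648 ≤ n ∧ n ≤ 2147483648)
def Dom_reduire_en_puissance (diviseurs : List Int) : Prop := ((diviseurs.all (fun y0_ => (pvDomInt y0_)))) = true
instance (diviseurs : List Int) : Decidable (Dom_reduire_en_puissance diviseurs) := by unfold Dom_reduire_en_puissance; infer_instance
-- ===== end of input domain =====

-- B run-length encodes the sorted list instead of A's dict-membership loop; equal return values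
-- (equivalence is about the RETURN value; both Pythons sort the argument in place the same way).

-- ===== PORT A =====
-- diviseurs.sort(); then for each element: if present bump its dict entry else insert 1; return the dict.
def reduire_en_puissance (diviseurs : List Int) : List (Int × Int) :=
  (PySem.List.sorted diviseurs (fun x => x) false).foldl
    (fun d x => if d.contains x then d.insert x (d.getD x 0 + 1) else d.insert x 1)
    (PySem.Dict.empty : PySem.Dict Int Int)
  |>.items

-- ===== PORT B =====
-- the outer while loop of Source B: take the run of the head element, emit (head, run length), recurse on the rest
def pvRle (s : List Int) : List (Int × Int) :=
  match s with
  | [] => []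
  | x :: xs =>
      (x, 1 + ((xs.takeWhile (· == x)).length : Int)) :: pvRle (xs.dropWhile (· == x))
termination_by s.length
decreasing_by
  simp only [List.length_cons]
  exact Nat.lt_succ_of_le (List.dropWhile_sublist _).length_le

def reduire_en_puissance_alt (diviseurs : List Int) : List (Int × Int) :=
  pvRle (PySem.List.sorted diviseurs (fun x => x) false)

-- ===== PRECONDITION & SPEC =====
def Spec_reduire_en_puissance (diviseurs : List Int) (out : List (Int × Int)) : Prop := out = reduire_en_puissance_alt diviseurs
instance (diviseurs : List Int) (out : List (Int × Int)) : Decidable (Spec_reduire_en_puissance diviseurs out) := by unfold Spec_reduire_en_puissance; infer_instance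

-- ===== CLAIM (what is proved, stated in full; the proofs are below) =====
def Claim_equal_reduire_en_puissance : Prop := ∀ (diviseurs : List Int), Dom_reduire_en_puissance diviseurs → Spec_reduire_en_puissance diviseurs (reduire_en_puissance diviseurs)

-- ===== LEMMAS AND PROOFS =====

-- A's loop body equals the unconditional counter step
theorem pv_stepA_eq :
    (fun (d : PySem.Dict Int Int) (x : Int) =>
        if d.contains x then d.insert x (d.getD x 0 + 1) else d.insert x 1)
      = fun d x => d.insert x (d.getD x 0 + 1) := by
  funext d x
  by_cases h : d.contains x
  · simp [h]
  · have h0 : d.getD x 0 = 0 := PySem.Dict.getD_of_not_contains d 0 (by simpa using h)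
    simp [h, h0]

theorem pv_foldl_add_cons {x : Int} (r : List Int) (s : List Int) (hx : x ∉ r) :
    r.foldl PySem.Set.add (x :: s) = x :: r.foldl PySem.Set.add s := by
  induction r generalizing s with
  | nil => rfl
  | cons y ys ih =>
    have hyx : y ≠ x := fun h => hx (h ▸ List.mem_cons_self)
    have hx' : x ∉ ys := fun h => hx (List.mem_cons_of_mem _ h)
    simp only [List.foldl_cons]
    rw [show PySem.Set.add (x :: s) y = x :: PySem.Set.add s y by
      by_cases hm : y ∈ s
      · rw [PySem.Set.add_of_mem hm, PySem.Set.add_of_mem (List.mem_cons_of_mem _ hm)]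
      · rw [PySem.Set.add_of_not_mem hm,
            PySem.Set.add_of_not_mem (s := x :: s) (by simp [hm, hyx])]
        simp]
    exact ih _ hx'

theorem pv_ofList_run {x : Int} (t r : List Int) (ht : ∀ y ∈ t, y = x) (hr : x ∉ r) :
    PySem.Set.ofList (x :: (t ++ r)) = x :: PySem.Set.ofList r := by
  rw [PySem.Set.ofList_eq_foldl, PySem.Set.ofList_eq_foldl]
  simp only [List.foldl_cons, List.foldl_append]
  have h1 : PySem.Set.add ([] : List Int) x = [x] := by
    rw [PySem.Set.add_of_not_mem (List.not_mem_nil)]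
    rfl
  rw [show List.foldl PySem.Set.add (PySem.Set.add ([] : List Int) x) t = [x] by
    rw [h1]
    induction t with
    | nil => rfl
    | cons y ys ih =>
      have hy : y = x := ht y List.mem_cons_self
      simp only [List.foldl_cons, hy, PySem.Set.add_of_mem (List.mem_singleton.mpr rfl)]
      exact ih (fun z hz => ht z (List.mem_cons_of_mem _ hz))]
  exact pv_foldl_add_cons r [] hr

-- dropWhile p l never starts with an element satisfying p
theorem pv_dropWhile_head_false (p : Int → Bool) :
    ∀ (l : List Int) {h : Int} {t : List Int}, l.dropWhile p = h :: t → p h = false := by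
  intro l
  induction l with
  | nil => intro h t hc; simp at hc
  | cons a as ih =>
    intro h t hc
    by_cases hp : p a
    · rw [List.dropWhile_cons_of_pos hp] at hc; exact ih hc
    · rw [List.dropWhile_cons_of_neg hp] at hc
      cases hc; simpa using hp

-- the head element does not reappear after its run, on a ≤-sorted tail
theorem pv_not_mem_drop {x : Int} (xs : List Int)
    (hx : ∀ y ∈ xs, x ≤ y) (hp : xs.Pairwise (· ≤ ·)) :
    x ∉ xs.dropWhile (· == x) := by
  intro hmem
  have hrne : xs.dropWhile (· == x) ≠ [] := fun h => by simp [h] at hmem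
  obtain ⟨h, r', hr⟩ := List.exists_cons_of_ne_nil hrne
  have hne : h ≠ x := by
    have := pv_dropWhile_head_false (· == x) xs hr
    simpa using this
  have hsub : (xs.dropWhile (· == x)).Sublist xs := List.dropWhile_sublist _
  have hrp : (xs.dropWhile (· == x)).Pairwise (· ≤ ·) := hp.sublist hsub
  have hhx : x ≤ h := hx h (hsub.mem (by simp [hr]))
  rcases (by rw [hr] at hmem; simpa using hmem : x = h ∨ x ∈ r') with he | hxr'
  · exact hne he.symm
  · have : h ≤ x := by
      rw [hr] at hrp
      exact (List.pairwise_cons.mp hrp).1 x hxr'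
    exact hne (le_antisymm this hhx)

-- run-length encoding of a ≤-sorted list is (distinct elements, multiplicities)
theorem pv_rle_eq (s : List Int) (hp : s.Pairwise (· ≤ ·)) :
    pvRle s = (PySem.Set.ofList s).map (fun k => (k, (s.count k : Int))) := by
  induction s using pvRle.induct with
  | case1 => simp [pvRle]
  | case2 x xs ih =>
    set t := xs.takeWhile (· == x) with htdef
    set r := xs.dropWhile (· == x) with hrdef
    have hxs : t ++ r = xs := List.takeWhile_append_dropWhile
    have ht : ∀ y ∈ t, y = x := by
      intro y hy
      have := List.mem_takeWhile_imp hy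
      simpa using this
    have hxle : ∀ y ∈ xs, x ≤ y := fun y hy => (List.pairwise_cons.mp hp).1 y hy
    have hpxs : xs.Pairwise (· ≤ ·) := (List.pairwise_cons.mp hp).2
    have hr : x ∉ r := pv_not_mem_drop xs hxle hpxs
    have hpr : r.Pairwise (· ≤ ·) := hpxs.sublist (List.dropWhile_sublist _)
    rw [pvRle]
    rw [← htdef, ← hrdef, ← hxs]
    rw [pv_ofList_run t r ht hr, ih hpr]
    simp only [List.map_cons]
    congr 1
    · -- the count of x is 1 + run length
      have hcx : (x :: (t ++ r)).count x = 1 + t.length := by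
        have h1 : t.count x = t.length := by
          rw [List.count_eq_length]; intro y hy; exact ((ht y hy) ▸ rfl)
        have h2 : r.count x = 0 := List.count_eq_zero.mpr hr
        simp [List.count_append, h1, h2]; omega
      rw [hcx]; simp
    · -- counts of later elements ignore x and its run
      apply List.map_congr_left
      intro k hk
      have hkr : k ∈ r := (PySem.Set.mem_ofList r k).mp hk
      have hkx : k ≠ x := fun he => hr (he ▸ hkr)
      have hkt : t.count k = 0 := by
        rw [List.count_eq_zero]
        intro hktm; exact hkx (ht k hktm)
      simp [List.count_append, hkt, Ne.symm hkx]

-- ===== VERDICT (by name: the statement is the Claim_ definition above) =====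
theorem reduire_en_puissance_spec : Claim_equal_reduire_en_puissance := by
  intro diviseurs _
  unfold Spec_reduire_en_puissance reduire_en_puissance reduire_en_puissance_alt
  rw [pv_stepA_eq, PySem.Dict.foldl_insert_getD_add_one_eq_counter,
      PySem.Dict.items_counter,
      pv_rle_eq _ (PySem.List.sorted_pairwise diviseurs (fun x => x) )]
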